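-- pv_equiv track=rewrite | github.com/BennyJane/algorithm_mad | leetcode/match/NO264/countHighestScoreNodes.py | countHighestScoreNodes2
-- ===== SOURCE A (Python) =====
-- from typing import List
-- from functools import lru_cache
--
-- def countHighestScoreNodes2(parents: List[int]) -> int:
--     n = len(parents)
--     # 计算每个节点在子节点，最多两个
--     # FIXME 预先处理，找到子节点
--     son = [[] for _ in range(n)]
--     for i in range(1, n):
--         p = parents[i]
--         son[p].append(i)
--
--     d = dict()  # 记录每个根节点下在节点数量
--
--     @lru_cache(None)
--     def calNodeCount(p: int):
--         """计算每个子树的节点个数"""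
--         if not son[p]:  # 没有子节点
--             d[p] = 1
--             return 1
--         c = 1
--         for child_index in son[p]:
--             c += calNodeCount(child_index)
--         d[p] = c
--         return c
--
--     calNodeCount(0)
--
--     # TODO 注意题目要求，统计的是最大值出现的次数
--     ans = 0
--     max_value = 0
--     for i in range(n):
--         cnt = 1
--         for child in son[i]:
--             cnt = cnt * d[child]
--         if i != 0:
--             cnt = cnt * (d[0] - d[i])
--         if cnt == max_value:
--             ans += 1
--         elif cnt > max_value:
--             max_value = cnt
--             ans = 1
--
--     return ans
-- ===== SOURCE B (Python) =====
-- def countHighestScoreNodes2(parents):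
--     n = len(parents)
--     children = [[] for _ in range(n)]
--     for i in range(1, n):
--         children[parents[i]].append(i)
--     # subtree sizes without recursion: every node contributes 1 to each
--     # node on its path up to the root
--     sizes = [0] * n
--     for j in range(n):
--         sizes[j] += 1
--         w = j
--         while w:
--             w = parents[w]
--             sizes[w] += 1
--     # score every node, then count occurrences of the maximum
--     scores = []
--     for i in range(n):
--         s = 1
--         for c in children[i]:
--             s *= sizes[c]
--         if i:
--             s *= sizes[0] - sizes[i]
--         scores.append(s)
--     return scores.count(max(scores))
-- ===== Notes on version B (the rewrite author's own statement) =====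
-- stated objective: alternative
-- what changed: Replaces the memoized recursive DFS + side-effect dict of subtree sizes by a non-recursive upward walk (each node increments every node on its path to the root) into a plain size list, and the running max/count loop by scores.count(max(scores)); Pre_ restricts to the task's natural domain (nonnegative in-range parent indices, every node reaching root 0), excluding negative Python-wraparound parent entries on which A still returns but B's raw upward walk does not terminate.
-- outside the precondition, e.g. on countHighestScoreNodes2([-1, -2]): A returns 2, B does not finish within the time limit
import Mathlib
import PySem

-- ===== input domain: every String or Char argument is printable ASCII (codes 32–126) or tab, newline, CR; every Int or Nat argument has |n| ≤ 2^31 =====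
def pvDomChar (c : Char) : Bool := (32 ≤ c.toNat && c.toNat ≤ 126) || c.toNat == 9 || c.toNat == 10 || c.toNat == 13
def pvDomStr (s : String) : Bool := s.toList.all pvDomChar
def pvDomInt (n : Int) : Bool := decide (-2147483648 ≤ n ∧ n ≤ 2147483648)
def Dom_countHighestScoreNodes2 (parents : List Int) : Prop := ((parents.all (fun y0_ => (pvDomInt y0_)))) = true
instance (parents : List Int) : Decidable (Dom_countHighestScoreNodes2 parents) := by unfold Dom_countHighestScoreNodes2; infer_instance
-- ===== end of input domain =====

-- B replaces A's memoized recursive DFS + dict of subtree sizes by a non-recursive upward walk into a size list,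
-- and replaces A's running max/count loop by scores.count(max(scores)); alternative decomposition, no speed claim.


-- shared helper: the effective parent index `parents[j]` as a Python list index
-- (negative-index wraparound: parents[j] % n; exact for -n ≤ parents[j] < n, and on
-- Pre_'s nonnegative parents it is simply parents[j] itself)
def pvPar (parents : List Int) (j : Nat) : Nat :=
  (PySem.Int.mod (parents.getD j 0) (parents.length : Int)).toNat

-- ===== PORT A =====
-- `calNodeCount` with fuel (A's recursion terminates on Pre_-trees; fuel n+1 is ample there, see calA lemmas below);
-- the lru_cache only avoids repeated work (each node has one parent, so each call happens once) and is value-irrelevant.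
def pvCalA (son : List (List Nat)) : Nat → Nat → PySem.Dict Nat Int → Int × PySem.Dict Nat Int
  | 0, _, d => (0, d)
  | fuel+1, p, d =>
    let ch := son.getD p []
    if ch = [] then (1, d.insert p 1)
    else
      let r := ch.foldl (fun (st : Int × PySem.Dict Nat Int) c =>
        let r2 := pvCalA son fuel c st.2
        (st.1 + r2.1, r2.2)) (1, d)
      (r.1, r.2.insert p r.1)

def pvSonA (parents : List Int) : List (List Nat) :=
  -- for i in range(1, n): son[parents[i]].append(i)   (negative p wraps; out-of-range p raises, excluded by Pre_)
  (PySem.List.pyRange 1 (parents.length : Int) 1).foldl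
    (fun son i =>
      let p := pvPar parents i.toNat
      son.set p (son.getD p [] ++ [i.toNat]))
    (List.replicate parents.length [])

-- one iteration of A's scoring loop over the running (ans, max_value) pair
def pvScoreStepA (son : List (List Nat)) (d : PySem.Dict Nat Int) (st : Int × Int) (i : Int) :
    Int × Int :=
  let cnt := (son.getD i.toNat []).foldl (fun c child => c * d.getD child 0) 1
  let cnt := if i ≠ 0 then cnt * (d.getD 0 0 - d.getD i.toNat 0) else cnt
  if cnt = st.2 then (st.1 + 1, st.2)
  else if cnt > st.2 then (1, cnt)
  else st

def countHighestScoreNodes2 (parents : List Int) : Int :=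
  let n := parents.length
  let son := pvSonA parents
  let d := (pvCalA son (n + 1) 0 PySem.Dict.empty).2   -- calNodeCount(0); d[q] read below only for keys present under Pre_
  ((PySem.List.pyRange 0 (n : Int) 1).foldl (pvScoreStepA son d) (0, 0)).1

-- ===== PORT B =====
-- Source B's `while w: w = parents[w]; sizes[w] += 1`; fuel n+1 makes the loop a structural
-- recursion (on Pre_-trees the chain to the root has at most n nodes, so fuel never runs out)
def pvWalk (parents : List Int) : Nat → Nat → List Int → List Int
  | 0, _, sizes => sizes
  | fuel+1, w, sizes =>
    if w = 0 then sizes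
    else
      let w' := pvPar parents w
      pvWalk parents fuel w' (sizes.set w' (sizes.getD w' 0 + 1))

-- for i, p in enumerate(parents): if i: children[p].append(i)
def pvChildrenB (parents : List Int) : List (List Nat) :=
  (PySem.List.enumerate parents 0).foldl
    (fun ch pr =>
      if pr.1 ≠ 0 then
        let q := (PySem.Int.mod pr.2 (parents.length : Int)).toNat
        ch.set q (ch.getD q [] ++ [pr.1.toNat])
      else ch)
    (List.replicate parents.length [])

-- for j in range(n): sizes[j] += 1, then walk j up to the root, incrementing sizes
def pvSizesB (parents : List Int) : List Int :=
  (PySem.List.pyRange 0 (parents.length : Int) 1).foldl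
    (fun sz j => pvWalk parents (parents.length + 1) j.toNat
      (sz.set j.toNat (sz.getD j.toNat 0 + 1)))
    (List.replicate parents.length 0)

-- the score of node i from the child lists and the size list
def pvScoreB (children : List (List Nat)) (sizes : List Int) (i : Int) : Int :=
  let s := (children.getD i.toNat []).foldl (fun s c => s * sizes.getD c 0) 1
  if i ≠ 0 then s * (sizes.getD 0 0 - sizes.getD i.toNat 0) else s

def countHighestScoreNodes2_alt (parents : List Int) : Int :=
  let n := parents.length
  let children := pvChildrenB parents
  let sizes := pvSizesB parents
  -- scores list, then count occurrences of its maximum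
  let scores := (PySem.List.pyRange 0 (n : Int) 1).foldl
    (fun sc i => sc ++ [pvScoreB children sizes i]) []
  match PySem.List.max? scores (fun x => x) with
  | some m => (PySem.List.count scores m : Int)
  | none => 0   -- n = 0: Source B's max([]) raises; outside Pre_

-- ===== PRECONDITION & SPEC =====
-- Pre_ is the task's natural domain: a nonempty parent array whose entries (for i ≥ 1) are
-- nonnegative in-range indices (0 ≤ parents[i] < n) with every node reaching the root 0
-- (some iterate of the parent map sends it to 0 within n steps).
-- It excludes inputs where A raises (out-of-range entries: IndexError; nodes not reaching 0:
-- KeyError) and also negative in-range entries, on which A still returns via Python's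
-- negative-index wraparound but B's upward walk `while w: w = parents[w]` does not terminate.
def Pre_countHighestScoreNodes2 (parents : List Int) : Prop :=
  1 ≤ parents.length ∧
  ∀ i ∈ List.range parents.length,
    i = 0 ∨ (0 ≤ parents.getD i 0 ∧ parents.getD i 0 < (parents.length : Int) ∧
             ∃ k ∈ List.range (parents.length + 1), (pvPar parents)^[k] i = 0)
instance (parents : List Int) : Decidable (Pre_countHighestScoreNodes2 parents) := by
  unfold Pre_countHighestScoreNodes2; infer_instance

def pvWitness_countHighestScoreNodes2 : List Int := [0, 0, 1, 1]

def Spec_countHighestScoreNodes2 (parents : List Int) (out : Int) : Prop := out = countHighestScoreNodes2_alt parents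
instance (parents : List Int) (out : Int) : Decidable (Spec_countHighestScoreNodes2 parents out) := by unfold Spec_countHighestScoreNodes2; infer_instance

-- ===== CLAIM (what is proved, stated in full; the proofs are below) =====
def Claim_equal_countHighestScoreNodes2 : Prop := ∀ (parents : List Int), Dom_countHighestScoreNodes2 parents → Pre_countHighestScoreNodes2 parents → Spec_countHighestScoreNodes2 parents (countHighestScoreNodes2 parents)

-- ===== LEMMAS AND PROOFS =====

-- ---- proof-only notions: reachability with fuel, chains to the root, depth, child lists, subtree size ----

-- does following effective parents from j reach node 0 within `fuel` steps?
def pvReach (parents : List Int) : Nat → Nat → Bool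
  | 0, j => decide (j = 0)
  | fuel+1, j => decide (j = 0) || pvReach parents fuel (pvPar parents j)

-- the chain j, par j, par² j, …, stopped at 0 (or at fuel exhaustion)
def pvChain (parents : List Int) : Nat → Nat → List Nat
  | 0, j => [j]
  | f+1, j => if j = 0 then [j] else j :: pvChain parents f (pvPar parents j)

-- number of steps to reach 0 (under pvReach, the true distance)
def pvDD (parents : List Int) : Nat → Nat → Nat
  | 0, _ => 0
  | f+1, j => if j = 0 then 0 else pvDD parents f (pvPar parents j) + 1

def pvChilds (parents : List Int) (i : Nat) : List Nat :=
  (List.range parents.length).filter (fun j => decide (j ≠ 0) && decide (pvPar parents j = i))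

-- subtree size of i = number of nodes whose root chain passes through i
def pvCnt (parents : List Int) (i : Nat) : Nat :=
  (List.range parents.length).countP (fun j => decide (i ∈ pvChain parents parents.length j))

def pvStep (st : Int × Int) (x : Int) : Int × Int :=
  if x = st.2 then (st.1 + 1, st.2) else if x > st.2 then (1, x) else st

def pvScore (parents : List Int) (k : Nat) : Int :=
  let s := (pvChilds parents k).foldl (fun c child => c * (pvCnt parents child : Int)) 1
  if k ≠ 0 then s * ((pvCnt parents 0 : Int) - (pvCnt parents k : Int)) else s

lemma pvPar_lt (parents : List Int) (hn : 0 < parents.length) (j : Nat) :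
    pvPar parents j < parents.length := by
  unfold pvPar
  have h1 := PySem.Int.mod_lt (parents.getD j 0) (b := (parents.length : Int)) (by exact_mod_cast hn)
  have h2 := PySem.Int.mod_nonneg (parents.getD j 0) (b := (parents.length : Int)) (by exact_mod_cast hn)
  omega

lemma reach_zero (parents : List Int) (f : Nat) : pvReach parents f 0 = true := by
  cases f <;> simp [pvReach]

lemma reach_mono (parents : List Int) {f g j : Nat} (h : f ≤ g)
    (hr : pvReach parents f j = true) : pvReach parents g j = true := by
  induction g generalizing f j with
  | zero => interval_cases f; exact hr
  | succ g ih =>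
    cases f with
    | zero => simp [pvReach] at hr ⊢; simp [hr]
    | succ f =>
      simp [pvReach] at hr ⊢
      rcases hr with hr | hr
      · exact Or.inl hr
      · exact Or.inr (ih (by omega) hr)

lemma iterate_reach (parents : List Int) :
    ∀ k i, (pvPar parents)^[k] i = 0 → pvReach parents k i = true := by
  intro k
  induction k with
  | zero => intro i h; simpa [pvReach] using h
  | succ k ih =>
    intro i h
    by_cases hi : i = 0
    · simp [pvReach, hi]
    · have h' : (pvPar parents)^[k] (pvPar parents i) = 0 := by
        simpa [Function.iterate_succ_apply] using h
      simp [pvReach, hi, ih _ h']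

lemma chain_zero (parents : List Int) (f : Nat) : pvChain parents f 0 = [0] := by
  cases f <;> simp [pvChain]

lemma chain_stable (parents : List Int) {f j : Nat} (hr : pvReach parents f j = true) :
    ∀ g, f ≤ g → pvChain parents g j = pvChain parents f j := by
  induction f generalizing j with
  | zero =>
    have hj : j = 0 := by simpa [pvReach] using hr
    intro g _; subst hj; rw [chain_zero, chain_zero]
  | succ f ih =>
    intro g hg
    by_cases hj : j = 0
    · subst hj; rw [chain_zero, chain_zero]
    · simp [pvReach, hj] at hr
      obtain ⟨g', rfl⟩ : ∃ g', g = g' + 1 := ⟨g - 1, by omega⟩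
      simp only [pvChain, if_neg hj]
      rw [ih hr g' (by omega)]

lemma dd_stable (parents : List Int) {f j : Nat} (hr : pvReach parents f j = true) :
    ∀ g, f ≤ g → pvDD parents g j = pvDD parents f j := by
  induction f generalizing j with
  | zero =>
    have hj : j = 0 := by simpa [pvReach] using hr
    intro g _; subst hj; cases g <;> simp [pvDD]
  | succ f ih =>
    intro g hg
    by_cases hj : j = 0
    · subst hj; cases g <;> simp [pvDD]
    · simp [pvReach, hj] at hr
      obtain ⟨g', rfl⟩ : ∃ g', g = g' + 1 := ⟨g - 1, by omega⟩
      simp only [pvDD, if_neg hj]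
      rw [ih hr g' (by omega)]

lemma mem_chain_self (parents : List Int) (f j : Nat) : j ∈ pvChain parents f j := by
  cases f with
  | zero => simp [pvChain]
  | succ f => by_cases hj : j = 0 <;> simp [pvChain, hj]

lemma zero_mem_chain (parents : List Int) {f j : Nat} (hr : pvReach parents f j = true) :
    0 ∈ pvChain parents f j := by
  induction f generalizing j with
  | zero =>
    have : j = 0 := by simpa [pvReach] using hr
    simp [this, pvChain]
  | succ f ih =>
    by_cases hj : j = 0
    · simp [hj, pvChain]
    · simp [pvReach, hj] at hr
      simp [pvChain, hj, ih hr]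

-- under reach, the distance of the parent is one less
lemma dist_par (parents : List Int) {f j : Nat} (hn : 0 < parents.length)
    (hr : pvReach parents f j = true) (hf : f ≤ parents.length) (hj : j ≠ 0) :
    pvDD parents parents.length (pvPar parents j) + 1 = pvDD parents parents.length j := by
  cases f with
  | zero => simp [pvReach, hj] at hr
  | succ f =>
    simp [pvReach, hj] at hr
    obtain ⟨m, hm⟩ : ∃ m, parents.length = m + 1 := ⟨parents.length - 1, by omega⟩
    have h1 : pvDD parents (m + 1) j = pvDD parents m (pvPar parents j) + 1 := by
      simp [pvDD, hj]
    have h2 : pvReach parents m (pvPar parents j) = true :=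
      reach_mono parents (f := f) (by omega) hr
    rw [hm, h1, dd_stable parents h2 (m + 1) (by omega), dd_stable parents h2 m (le_refl m)]

-- every element of a chain has distance at most the head's
lemma chain_dd (parents : List Int) (hn : 0 < parents.length) :
    ∀ {f j : Nat}, pvReach parents f j = true → f ≤ parents.length →
    ∀ x ∈ pvChain parents f j,
      pvDD parents parents.length x ≤ pvDD parents parents.length j := by
  intro f j hr hf x hx
  induction f generalizing j with
  | zero =>
    have : j = 0 := by simpa [pvReach] using hr
    subst this; simp [pvChain] at hx; subst hx; exact le_refl _
  | succ f ih =>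
    by_cases hj : j = 0
    · subst hj; rw [chain_zero] at hx; simp at hx; subst hx; exact le_refl _
    · simp [pvReach, hj] at hr
      simp only [pvChain, if_neg hj, List.mem_cons] at hx
      rcases hx with rfl | hx
      · exact le_refl _
      · have h1 := ih hr (by omega) hx
        have h2 := dist_par parents hn (f := f + 1) (by simp [pvReach, hj, hr]) hf hj
        omega

lemma chain_unfold (parents : List Int) {j : Nat} (hn : 0 < parents.length)
    (hr : pvReach parents parents.length j = true) (hj : j ≠ 0) :
    pvChain parents parents.length j = j :: pvChain parents parents.length (pvPar parents j) := by
  obtain ⟨m, hm⟩ : ∃ m, parents.length = m + 1 := ⟨parents.length - 1, by omega⟩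
  rw [hm] at hr ⊢
  simp [pvReach, hj] at hr
  conv_lhs => rw [pvChain]
  rw [if_neg hj, chain_stable parents hr (m + 1) (by omega)]

lemma mem_childs (parents : List Int) {c i : Nat} :
    c ∈ pvChilds parents i ↔ c < parents.length ∧ c ≠ 0 ∧ pvPar parents c = i := by
  simp [pvChilds, List.mem_filter, List.mem_range]

lemma nodup_childs (parents : List Int) (i : Nat) : (pvChilds parents i).Nodup := by
  exact (List.nodup_range).filter _

-- THE CORE CHAIN FACT: among the children of i, exactly one lies on the chain of j when i does (strictly below j), else none
lemma childs_countP (parents : List Int) (hn : 0 < parents.length)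
    (hR : ∀ x, x < parents.length → pvReach parents parents.length x = true) :
    ∀ j, j < parents.length → ∀ i,
      (pvChilds parents i).countP (fun c => decide (c ∈ pvChain parents parents.length j)) =
        if i ∈ pvChain parents parents.length j ∧ j ≠ i then 1 else 0 := by
  suffices H : ∀ dv j, pvDD parents parents.length j = dv → j < parents.length → ∀ i,
      (pvChilds parents i).countP (fun c => decide (c ∈ pvChain parents parents.length j)) =
        if i ∈ pvChain parents parents.length j ∧ j ≠ i then 1 else 0 by
    intro j hj i; exact H _ j rfl hj i
  intro dv
  induction dv using Nat.strong_induction_on with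
  | _ dv IH =>
    intro j hdv hj i
    by_cases hj0 : j = 0
    · subst hj0
      rw [chain_zero, List.countP_eq_zero.mpr, if_neg]
      · rintro ⟨hmem, hne⟩
        simp at hmem
        exact hne hmem.symm
      · intro c hc
        rcases (mem_childs parents).mp hc with ⟨_, hc0, _⟩
        simp [hc0]
    · -- j ≠ 0; write C j = j :: C (par j)
      have hrj : pvReach parents parents.length j = true := hR j hj
      have hpjlt : pvPar parents j < parents.length := pvPar_lt parents hn j
      have hrpj : pvReach parents parents.length (pvPar parents j) = true := hR _ hpjlt
      have hddpj : pvDD parents parents.length (pvPar parents j) + 1 =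
          pvDD parents parents.length j := dist_par parents hn hrj (le_refl _) hj0
      have hunf := chain_unfold parents hn hrj hj0
      have hchild_dd : ∀ c ∈ pvChilds parents i,
          pvDD parents parents.length c = pvDD parents parents.length i + 1 := by
        intro c hc
        rcases (mem_childs parents).mp hc with ⟨hclt, hc0, hcpar⟩
        have := dist_par parents hn (hR c hclt) (le_refl _) hc0
        rw [hcpar] at this
        omega
      by_cases hpj : pvPar parents j = i
      · -- j is itself a child of i; the chain below j is the chain of i
        have hji : j ≠ i := by
          intro h
          subst h
          rw [hpj] at hddpj
          omega
        have hjmem : j ∈ pvChilds parents i := (mem_childs parents).mpr ⟨hj, hj0, hpj⟩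
        have hiCj : i ∈ pvChain parents parents.length j := by
          rw [hunf, hpj]
          exact List.mem_cons_of_mem _ (mem_chain_self parents _ i)
        rw [if_pos ⟨hiCj, hji⟩]
        have hcongr : (pvChilds parents i).countP
            (fun c => decide (c ∈ pvChain parents parents.length j)) =
            (pvChilds parents i).countP (fun c => c == j) := by
          apply List.countP_congr
          intro c hc
          rcases (mem_childs parents).mp hc with ⟨hclt, hc0, hcpar⟩
          have hcnotin : c ∉ pvChain parents parents.length (pvPar parents j) := by
            rw [hpj]
            intro hin
            have := chain_dd parents hn (hR i (hpj ▸ hpjlt)) (le_refl _) c hin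
            have := hchild_dd c hc
            omega
          rw [hunf]
          simp [hcnotin]
        rw [hcongr]
        exact List.count_eq_one_of_mem (nodup_childs parents i) hjmem
      · -- j is a child of some other node; recurse on the parent's chain
        have hddlt : pvDD parents parents.length (pvPar parents j) < dv := by omega
        have hcongr : (pvChilds parents i).countP
            (fun c => decide (c ∈ pvChain parents parents.length j)) =
            (pvChilds parents i).countP
            (fun c => decide (c ∈ pvChain parents parents.length (pvPar parents j))) := by
          apply List.countP_congr
          intro c hc
          rcases (mem_childs parents).mp hc with ⟨hclt, hc0, hcpar⟩
          have hcj : c ≠ j := by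
            intro h
            exact hpj (h ▸ hcpar)
          rw [hunf]
          simp [hcj]
        rw [hcongr, IH _ hddlt (pvPar parents j) rfl hpjlt i]
        by_cases hij : i = j
        · subst hij
          have hnotin : i ∉ pvChain parents parents.length (pvPar parents i) := by
            intro hin
            have := chain_dd parents hn hrpj (le_refl _) i hin
            omega
          simp [hnotin]
        · have hmemiff : i ∈ pvChain parents parents.length j ↔
              i ∈ pvChain parents parents.length (pvPar parents j) := by
            rw [hunf]
            simp [hij]
          by_cases hin : i ∈ pvChain parents parents.length (pvPar parents j)
          · rw [if_pos ⟨hin, hpj⟩, if_pos ⟨hmemiff.mpr hin, Ne.symm hij⟩]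
          · rw [if_neg, if_neg]
            · rintro ⟨h1, _⟩; exact hin (hmemiff.mp h1)
            · rintro ⟨h1, _⟩; exact hin h1

lemma cnt_pos (parents : List Int) {i : Nat} (hi : i < parents.length) :
    1 ≤ pvCnt parents i := by
  unfold pvCnt
  rw [Nat.succ_le_iff, List.countP_pos_iff]
  exact ⟨i, by simpa using hi, by simp [mem_chain_self]⟩

lemma cnt_le (parents : List Int) (i : Nat) : pvCnt parents i ≤ parents.length := by
  simpa using List.countP_le_length
    (p := fun j => decide (i ∈ pvChain parents parents.length j)) (l := List.range parents.length)

lemma sum_map_ind (L : List Nat) (p : Nat → Prop) [DecidablePred p] :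
    (L.map (fun j => if p j then 1 else 0)).sum = L.countP (fun j => decide (p j)) := by
  induction L with
  | nil => simp
  | cons a L ih => simp [List.countP_cons, ih, Nat.add_comm]

lemma sum_map_add_nat (L : List Nat) (f g : Nat → Nat) :
    (L.map (fun j => f j + g j)).sum = (L.map f).sum + (L.map g).sum := by
  induction L with
  | nil => simp
  | cons a L ih => simp [ih]; omega

lemma sum_countP_swap (L M : List Nat) (p : Nat → Nat → Bool) :
    (L.map (fun j => M.countP (fun c => p j c))).sum =
      (M.map (fun c => L.countP (fun j => p j c))).sum := by
  induction M with
  | nil => simp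
  | cons c M ih =>
    simp only [List.map_cons, List.sum_cons, List.countP_cons]
    rw [sum_map_add_nat, ih, sum_map_ind]
    have hpp : (fun j => decide (p j c = true)) = (fun j => p j c) := by
      funext j; simp
    rw [hpp]
    omega

-- the subtree-size recurrence: size i = 1 + sum of the children's sizes
lemma cnt_rec (parents : List Int) (hn : 0 < parents.length)
    (hR : ∀ x, x < parents.length → pvReach parents parents.length x = true)
    {i : Nat} (hi : i < parents.length) :
    pvCnt parents i = 1 + ((pvChilds parents i).map (pvCnt parents)).sum := by
  unfold pvCnt
  have hpt : ∀ j ∈ List.range parents.length,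
      (if i ∈ pvChain parents parents.length j then 1 else 0) =
        (if j = i then 1 else 0) +
          (pvChilds parents i).countP (fun c => decide (c ∈ pvChain parents parents.length j)) := by
    intro j hjm
    have hjlt : j < parents.length := List.mem_range.mp hjm
    rw [childs_countP parents hn hR j hjlt i]
    by_cases hji : j = i
    · subst hji
      simp [mem_chain_self]
    · simp only [if_neg hji]
      by_cases hin : i ∈ pvChain parents parents.length j
      · simp [hin, hji]
      · simp [hin]
  have h1 : (List.range parents.length).countP
      (fun j => decide (i ∈ pvChain parents parents.length j)) =
      ((List.range parents.length).map
        (fun j => (if j = i then 1 else 0) +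
          (pvChilds parents i).countP (fun c => decide (c ∈ pvChain parents parents.length j)))).sum := by
    rw [← sum_map_ind (List.range parents.length)
      (fun j => i ∈ pvChain parents parents.length j)]
    exact congrArg List.sum (List.map_congr_left hpt)
  rw [h1, sum_map_add_nat]
  have h2 : ((List.range parents.length).map (fun j => if j = i then 1 else 0)).sum = 1 := by
    rw [sum_map_ind (L := List.range parents.length) (p := fun j => j = i)]
    have : (List.range parents.length).countP (fun j => decide (j = i)) =
        (List.range parents.length).count i := by
      apply List.countP_congr
      intro x _
      simp
    rw [this]
    exact List.count_eq_one_of_mem List.nodup_range (by simpa using hi)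
  rw [h2, sum_countP_swap]

lemma cnt_zero (parents : List Int) (hn : 0 < parents.length)
    (hR : ∀ x, x < parents.length → pvReach parents parents.length x = true) :
    pvCnt parents 0 = parents.length := by
  unfold pvCnt
  rw [List.countP_eq_length.mpr]
  · exact List.length_range
  · intro j hj
    simpa using zero_mem_chain parents (hR j (List.mem_range.mp hj))

lemma range_tail (n : Nat) (hn : 0 < n) :
    List.range n = 0 :: (List.range (n - 1)).map (fun k => k + 1) := by
  obtain ⟨m, rfl⟩ : ∃ m, n = m + 1 := ⟨n - 1, by omega⟩
  simp [List.range_succ_eq_map]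

lemma cnt_lt_of_ne (parents : List Int) (hn : 0 < parents.length)
    {i : Nat} (hi : i < parents.length) (hi0 : i ≠ 0) :
    pvCnt parents i < parents.length := by
  unfold pvCnt
  rw [range_tail parents.length hn, List.countP_cons]
  have h0 : (decide (i ∈ pvChain parents parents.length 0)) = false := by
    rw [chain_zero]
    simpa using hi0
  rw [h0]
  simp only [Bool.false_eq_true, if_false, Nat.add_zero]
  calc ((List.range (parents.length - 1)).map (fun k => k + 1)).countP _
      ≤ ((List.range (parents.length - 1)).map (fun k => k + 1)).length :=
        List.countP_le_length
    _ < parents.length := by rw [List.length_map, List.length_range]; omega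

lemma getD_set {α : Type} (l : List α) (w q : Nat) (d v : α) (hw : w < l.length) :
    (l.set w v).getD q d = if q = w then v else l.getD q d := by
  rw [List.getD_eq_getElem?_getD, List.getD_eq_getElem?_getD, List.getElem?_set]
  by_cases hq : q = w
  · simp [hq, hw]
  · simp [hq, Ne.symm hq]

lemma cast_sum_map (cs : List Nat) (f : Nat → Nat) :
    (((cs.map f).sum : Nat) : Int) = (cs.map (fun c => (f c : Int))).sum := by
  induction cs with
  | nil => simp
  | cons c cs ih => simp [ih]

-- ---- A-side: pvCalA computes pvCnt and fills the dict with pvCnt on the subtree ----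

def pvFoldF (son : List (List Nat)) (fuel : Nat) :
    (Int × PySem.Dict Nat Int) → Nat → (Int × PySem.Dict Nat Int) :=
  fun st c =>
    let r2 := pvCalA son fuel c st.2
    (st.1 + r2.1, r2.2)

lemma calA_fold (parents : List Int) (son : List (List Nat)) (fuel : Nat)
    (IH : ∀ p d, p < parents.length → pvCnt parents p ≤ fuel →
      (pvCalA son fuel p d).1 = (pvCnt parents p : Int) ∧
      ∀ q, (pvCalA son fuel p d).2.getD q 0 =
        if q < parents.length ∧ p ∈ pvChain parents parents.length q then (pvCnt parents q : Int)
        else d.getD q 0) :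
    ∀ (cs : List Nat) (a : Int) (d : PySem.Dict Nat Int),
      (∀ c ∈ cs, c < parents.length ∧ pvCnt parents c ≤ fuel) →
      (cs.foldl (pvFoldF son fuel) (a, d)).1 =
        a + ((cs.map (fun c => (pvCnt parents c : Int))).sum) ∧
      ∀ q, (cs.foldl (pvFoldF son fuel) (a, d)).2.getD q 0 =
        if q < parents.length ∧ ∃ c ∈ cs, c ∈ pvChain parents parents.length q
        then (pvCnt parents q : Int) else d.getD q 0 := by
  intro cs
  induction cs with
  | nil => intro a d _; simp
  | cons c cs ih =>
    intro a d h
    obtain ⟨hclt, hcf⟩ := h c (by simp)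
    have hcs : ∀ c' ∈ cs, c' < parents.length ∧ pvCnt parents c' ≤ fuel :=
      fun c' hc' => h c' (by simp [hc'])
    obtain ⟨ihc1, ihc2⟩ := IH c d hclt hcf
    obtain ⟨iha, ihd⟩ := ih (a + (pvCalA son fuel c d).1) (pvCalA son fuel c d).2 hcs
    have hstep : (c :: cs).foldl (pvFoldF son fuel) (a, d) =
        cs.foldl (pvFoldF son fuel) (a + (pvCalA son fuel c d).1, (pvCalA son fuel c d).2) := rfl
    rw [hstep]
    constructor
    · rw [iha, ihc1]
      simp [add_assoc]
    · intro q
      rw [ihd q, ihc2 q]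
      by_cases hq : q < parents.length
      · by_cases h1 : ∃ c' ∈ cs, c' ∈ pvChain parents parents.length q
        · rw [if_pos ⟨hq, h1⟩, if_pos ⟨hq, by obtain ⟨c', hc', hm⟩ := h1; exact ⟨c', by simp [hc'], hm⟩⟩]
        · rw [if_neg (fun hh => h1 hh.2)]
          by_cases h2 : c ∈ pvChain parents parents.length q
          · rw [if_pos ⟨hq, h2⟩, if_pos ⟨hq, c, by simp, h2⟩]
          · rw [if_neg (fun hh => h2 hh.2), if_neg]
            rintro ⟨_, c', hc', hm⟩
            rcases List.mem_cons.mp hc' with rfl | hc'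
            · exact h2 hm
            · exact h1 ⟨c', hc', hm⟩
      · rw [if_neg (fun hh => hq hh.1), if_neg (fun hh => hq hh.1), if_neg (fun hh => hq hh.1)]

lemma calA_spec (parents : List Int) (son : List (List Nat)) (hn : 0 < parents.length)
    (hR : ∀ x, x < parents.length → pvReach parents parents.length x = true)
    (hs : ∀ p, p < parents.length → son.getD p [] = pvChilds parents p) :
    ∀ (fuel : Nat) (p : Nat) (d : PySem.Dict Nat Int), p < parents.length → pvCnt parents p ≤ fuel →
      (pvCalA son fuel p d).1 = (pvCnt parents p : Int) ∧
      ∀ q, (pvCalA son fuel p d).2.getD q 0 =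
        if q < parents.length ∧ p ∈ pvChain parents parents.length q then (pvCnt parents q : Int)
        else d.getD q 0 := by
  intro fuel
  induction fuel with
  | zero =>
    intro p d hp hf
    have := cnt_pos parents hp
    omega
  | succ fuel ihf =>
    intro p d hp hf
    have hrec := cnt_rec parents hn hR hp
    have hconv : ∀ (cs : List Nat) (init : Int × PySem.Dict Nat Int),
        cs.foldl (fun (st : Int × PySem.Dict Nat Int) c =>
          let r2 := pvCalA son fuel c st.2
          (st.1 + r2.1, r2.2)) init = cs.foldl (pvFoldF son fuel) init := fun _ _ => rfl
    have hiffq : ∀ q, q < parents.length → q ≠ p →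
        (p ∈ pvChain parents parents.length q ↔
          ∃ c ∈ pvChilds parents p, c ∈ pvChain parents parents.length q) := by
      intro q hq hqp
      have hcp := childs_countP parents hn hR q hq p
      constructor
      · intro hm
        rw [if_pos ⟨hm, hqp⟩] at hcp
        have : 0 < (pvChilds parents p).countP
            (fun c => decide (c ∈ pvChain parents parents.length q)) := by omega
        obtain ⟨c, hc, hcm⟩ := List.countP_pos_iff.mp this
        exact ⟨c, hc, by simpa using hcm⟩
      · rintro ⟨c, hc, hcm⟩
        have : 0 < (pvChilds parents p).countP
            (fun c => decide (c ∈ pvChain parents parents.length q)) :=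
          List.countP_pos_iff.mpr ⟨c, hc, by simpa using hcm⟩
        by_contra hnm
        rw [if_neg (fun hh => hnm hh.1)] at hcp
        omega
    simp only [pvCalA]
    rw [hs p hp, hconv]
    by_cases hch : pvChilds parents p = []
    · rw [hch]
      simp only [eq_self_iff_true, if_true]
      constructor
      · rw [hrec, hch]
        simp
      · intro q
        rw [PySem.Dict.getD_insert]
        by_cases hq : q = p
        · subst hq
          rw [if_pos rfl, if_pos ⟨hp, mem_chain_self parents _ q⟩, hrec, hch]
          simp
        · rw [if_neg hq, if_neg]
          rintro ⟨hqlt, hm⟩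
          have := (hiffq q hqlt hq).mp hm
          rw [hch] at this
          simp at this
    · rw [if_neg hch]
      have hsum : ((pvChilds parents p).map (pvCnt parents)).sum ≤ fuel := by omega
      have hcsh : ∀ c ∈ pvChilds parents p, c < parents.length ∧ pvCnt parents c ≤ fuel := by
        intro c hc
        refine ⟨((mem_childs parents).mp hc).1, ?_⟩
        have : pvCnt parents c ≤ ((pvChilds parents p).map (pvCnt parents)).sum :=
          List.single_le_sum (by simp) _ (List.mem_map_of_mem hc)
        omega
      obtain ⟨hf1, hf2⟩ := calA_fold parents son fuel ihf (pvChilds parents p) 1 d hcsh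
      have hval : (1 : Int) + ((pvChilds parents p).map (fun c => (pvCnt parents c : Int))).sum =
          (pvCnt parents p : Int) := by
        rw [hrec, ← cast_sum_map]
        push_cast
        ring
      constructor
      · simp only [hf1, hval]
      · intro q
        simp only []
        rw [PySem.Dict.getD_insert, hf1, hval, hf2 q]
        by_cases hq : q = p
        · subst hq
          rw [if_pos rfl, if_pos ⟨hp, mem_chain_self parents _ q⟩]
        · rw [if_neg hq]
          by_cases hqlt : q < parents.length
          · by_cases hm : p ∈ pvChain parents parents.length q
            · rw [if_pos ⟨hqlt, (hiffq q hqlt hq).mp hm⟩, if_pos ⟨hqlt, hm⟩]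
            · rw [if_neg, if_neg (fun hh => hm hh.2)]
              rintro ⟨_, hex⟩
              exact hm ((hiffq q hqlt hq).mpr hex)
          · rw [if_neg (fun hh => hqlt hh.1), if_neg (fun hh => hqlt hh.1)]

-- ---- B-side: each per-node walk (increment j, then every node above it) adds the chain indicator ----

lemma walk_spec (parents : List Int) (hn : 0 < parents.length) :
    ∀ (f w : Nat) (sizes : List Int), pvReach parents f w = true → f ≤ parents.length →
      w < parents.length → sizes.length = parents.length →
      (pvWalk parents (f + 1) w (sizes.set w (sizes.getD w 0 + 1))).length = parents.length ∧
      ∀ q, (pvWalk parents (f + 1) w (sizes.set w (sizes.getD w 0 + 1))).getD q 0 =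
        sizes.getD q 0 + (if q ∈ pvChain parents f w then 1 else 0) := by
  intro f
  induction f with
  | zero =>
    intro w sizes hr _ hw hlen
    have hw0 : w = 0 := by simpa [pvReach] using hr
    subst hw0
    simp only [pvWalk, eq_self_iff_true, if_true]
    refine ⟨by simpa [List.length_set] using hlen, fun q => ?_⟩
    rw [getD_set sizes 0 q 0 _ (by omega)]
    by_cases hq : q = 0 <;> simp [hq, pvChain]
  | succ f ih =>
    intro w sizes hr hf hw hlen
    by_cases hw0 : w = 0
    · subst hw0
      simp only [pvWalk, eq_self_iff_true, if_true]
      refine ⟨by simpa [List.length_set] using hlen, fun q => ?_⟩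
      rw [getD_set sizes 0 q 0 _ (by omega), chain_zero]
      by_cases hq : q = 0 <;> simp [hq]
    · have hrp : pvReach parents f (pvPar parents w) = true := by
        simpa [pvReach, hw0] using hr
      have hplt := pvPar_lt parents hn w
      have hlen' : (sizes.set w (sizes.getD w 0 + 1)).length = parents.length := by
        simpa [List.length_set] using hlen
      obtain ⟨ihlen, ihget⟩ := ih (pvPar parents w) (sizes.set w (sizes.getD w 0 + 1)) hrp
        (by omega) hplt hlen'
      have hstep : pvWalk parents (f + 1 + 1) w (sizes.set w (sizes.getD w 0 + 1)) =
          pvWalk parents (f + 1) (pvPar parents w)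
            ((sizes.set w (sizes.getD w 0 + 1)).set (pvPar parents w)
              ((sizes.set w (sizes.getD w 0 + 1)).getD (pvPar parents w) 0 + 1)) := by
        simp [pvWalk, hw0]
      rw [hstep]
      refine ⟨ihlen, fun q => ?_⟩
      rw [ihget q, getD_set sizes w q 0 _ (by omega)]
      have hnotin : w ∉ pvChain parents f (pvPar parents w) := by
        intro hin
        have h1 := chain_dd parents hn hrp (by omega) w hin
        have h2 := dist_par parents hn (f := f + 1) hr hf hw0
        omega
      have hcu : pvChain parents (f + 1) w = w :: pvChain parents f (pvPar parents w) := by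
        simp [pvChain, hw0]
      rw [hcu]
      by_cases hq : q = w
      · subst hq
        simp [hnotin]
      · simp [hq]

lemma sizes_fold (parents : List Int) (hn : 0 < parents.length)
    (hR : ∀ x, x < parents.length → pvReach parents parents.length x = true) :
    ∀ (L : List Nat) (sizes : List Int), (∀ j ∈ L, j < parents.length) →
      sizes.length = parents.length →
      (L.foldl (fun sz j => pvWalk parents (parents.length + 1) j
        (sz.set j (sz.getD j 0 + 1))) sizes).length = parents.length ∧
      ∀ q, (L.foldl (fun sz j => pvWalk parents (parents.length + 1) j
        (sz.set j (sz.getD j 0 + 1))) sizes).getD q 0 =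
        sizes.getD q 0 + (L.countP (fun j => decide (q ∈ pvChain parents parents.length j)) : Int) := by
  intro L
  induction L with
  | nil => intro sizes _ hlen; simp [hlen]
  | cons j L ih =>
    intro sizes hL hlen
    have hjlt : j < parents.length := hL j (by simp)
    have hrj : pvReach parents parents.length j = true := hR j hjlt
    obtain ⟨wlen, wget⟩ := walk_spec parents hn parents.length j sizes hrj (le_refl _) hjlt hlen
    obtain ⟨flen, fget⟩ := ih (pvWalk parents (parents.length + 1) j
      (sizes.set j (sizes.getD j 0 + 1))) (fun x hx => hL x (by simp [hx])) wlen
    rw [List.foldl_cons]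
    refine ⟨flen, fun q => ?_⟩
    rw [fget q, wget q, List.countP_cons]
    by_cases hq : q ∈ pvChain parents parents.length j <;> simp [hq] <;> push_cast <;> ring

-- ---- child-list construction: both ports build pvChilds ----

lemma bucket_fold (parents : List Int) :
    ∀ (L : List Nat) (b : List (List Nat)), b.length = parents.length →
      (∀ j ∈ L, pvPar parents j < parents.length) →
      (L.foldl (fun b j => b.set (pvPar parents j) (b.getD (pvPar parents j) [] ++ [j])) b).length = parents.length ∧
      ∀ i, (L.foldl (fun b j => b.set (pvPar parents j) (b.getD (pvPar parents j) [] ++ [j])) b).getD i [] =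
        b.getD i [] ++ L.filter (fun j => decide (pvPar parents j = i)) := by
  intro L
  induction L with
  | nil => intro b hb _; simp [hb]
  | cons j L ih =>
    intro b hb hL
    have hjlt : pvPar parents j < parents.length := hL j (by simp)
    have hb' : (b.set (pvPar parents j) (b.getD (pvPar parents j) [] ++ [j])).length =
        parents.length := by simpa [List.length_set] using hb
    obtain ⟨flen, fget⟩ := ih (b.set (pvPar parents j) (b.getD (pvPar parents j) [] ++ [j])) hb'
      (fun x hx => hL x (by simp [hx]))
    rw [List.foldl_cons]
    refine ⟨flen, fun i => ?_⟩
    rw [fget i, getD_set b (pvPar parents j) i [] _ (by omega), List.filter_cons]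
    by_cases hij : pvPar parents j = i
    · subst hij
      simp
    · rw [if_neg (fun h => hij h.symm), if_neg (by simpa using hij)]

-- the list of nodes 1 … n-1 processed by both child-building loops
lemma son_eq (parents : List Int) (hn : 0 < parents.length) (i : Nat) :
    (pvSonA parents).getD i [] = pvChilds parents i := by
  unfold pvSonA
  have hcast : (((parents.length : Int)) - 1).toNat = parents.length - 1 := by omega
  rw [PySem.List.pyRange_one 1 (parents.length : Int), hcast, List.foldl_map]
  have hcongr : (List.range (parents.length - 1)).foldl
      (fun (son : List (List Nat)) (k : Nat) =>
        let p := pvPar parents ((1 : Int) + (k : Int)).toNat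
        son.set p (son.getD p [] ++ [((1 : Int) + (k : Int)).toNat]))
      (List.replicate parents.length []) =
      (List.range (parents.length - 1)).foldl
      (fun (son : List (List Nat)) k =>
        son.set (pvPar parents (k + 1)) (son.getD (pvPar parents (k + 1)) [] ++ [k + 1]))
      (List.replicate parents.length []) := by
    apply PySem.List.foldl_congr_mem
    intro acc k _
    have : ((1 : Int) + (k : Int)).toNat = k + 1 := by omega
    simp only [this]
  rw [hcongr, ← List.foldl_map (f := fun (k : Nat) => k + 1)
    (g := fun (son : List (List Nat)) j => son.set (pvPar parents j) (son.getD (pvPar parents j) [] ++ [j]))]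
  obtain ⟨-, hget⟩ := bucket_fold parents ((List.range (parents.length - 1)).map (fun k => k + 1))
    (List.replicate parents.length []) (by simp) (fun j _ => pvPar_lt parents hn j)
  rw [hget i]
  have hrep : (List.replicate parents.length ([] : List Nat)).getD i [] = [] := by
    rcases Nat.lt_or_ge i parents.length with h | h
    · rw [List.getD_eq_getElem _ _ (by simpa using h)]
      simp
    · rw [List.getD_eq_default _ _ (by simpa using h)]
  rw [hrep, List.nil_append]
  unfold pvChilds
  rw [range_tail parents.length hn, List.filter_cons, if_neg (by simp), List.filter_map,
    List.filter_map]
  have hfc : List.filter ((fun j => decide (j ≠ 0) && decide (pvPar parents j = i)) ∘ fun k => k + 1)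
      (List.range (parents.length - 1)) =
      List.filter ((fun j => decide (pvPar parents j = i)) ∘ fun k => k + 1)
      (List.range (parents.length - 1)) := by
    apply List.filter_congr
    intro k _
    simp [Function.comp]
  rw [hfc]

-- ---- scoring: the running (count, max) loop counts the occurrences of the maximum ----

lemma step_fold (l : List Int) (h : ∀ x ∈ l, 0 < x) :
    l.foldl pvStep (0, 0) = if l = [] then ((0 : Int), (0 : Int))
      else ((List.count (l.foldl max 0) l : Int), l.foldl max 0) := by
  induction l using List.reverseRecOn with
  | nil => simp
  | append_singleton l x ih =>
    have hx : 0 < x := h x (by simp)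
    have hl : ∀ y ∈ l, 0 < y := fun y hy => h y (by simp [hy])
    by_cases hl0 : l = []
    · subst hl0
      simp only [List.nil_append, List.foldl_cons, List.foldl_nil]
      rw [if_neg (by simp)]
      simp [pvStep, hx, ne_of_gt hx, max_eq_right (le_of_lt hx)]
    · rw [List.foldl_append, ih hl, if_neg hl0,
        if_neg (by simp [List.append_eq_nil_iff, hl0])]
      have hM := PySem.List.le_foldl_max l (0 : Int)
      obtain ⟨y, hy⟩ := List.exists_mem_of_ne_nil l hl0
      have hMpos : 0 < l.foldl max 0 := lt_of_lt_of_le (hl y hy) (hM.2 y hy)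
      rw [List.foldl_cons, List.foldl_nil]
      have hMx : List.foldl max 0 (l ++ [x]) = max (List.foldl max 0 l) x := by
        rw [List.foldl_append]
        rfl
      rw [hMx]
      unfold pvStep
      dsimp only
      rcases lt_trichotomy x (l.foldl max 0) with hlt | heq | hgt
      · rw [if_neg (ne_of_lt hlt), if_neg (show ¬x > List.foldl max 0 l by omega),
          max_eq_left (le_of_lt hlt), List.count_append]
        have hc : List.count (List.foldl max 0 l) [x] = 0 := by
          simp [List.count_cons, ne_of_lt hlt]
        rw [hc]
        simp
      · rw [if_pos heq, heq, max_self, List.count_append]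
        have hc : List.count (List.foldl max 0 l) [List.foldl max 0 l] = 1 := by simp
        rw [hc]
        push_cast
        ring_nf
      · rw [if_neg (ne_of_gt hgt), if_pos hgt, max_eq_right (le_of_lt hgt),
          List.count_append]
        have h0 : List.count x l = 0 :=
          List.count_eq_zero.mpr (fun hmem => absurd (hM.2 x hmem) (not_le.mpr hgt))
        have hc : List.count x [x] = 1 := by simp
        rw [h0, hc]
        simp

lemma score_pos (parents : List Int) (hn : 0 < parents.length)
    (hR : ∀ x, x < parents.length → pvReach parents parents.length x = true)
    {k : Nat} (hk : k < parents.length) : 0 < pvScore parents k := by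
  have hprod : ∀ (cs : List Nat), (∀ c ∈ cs, c < parents.length) → ∀ a : Int, 0 < a →
      0 < cs.foldl (fun c child => c * (pvCnt parents child : Int)) a := by
    intro cs
    induction cs with
    | nil => intro _ a ha; simpa using ha
    | cons c cs ih =>
      intro hmem a ha
      rw [List.foldl_cons]
      refine ih (fun x hx => hmem x (by simp [hx])) _ (mul_pos ha ?_)
      exact_mod_cast cnt_pos parents (hmem c (by simp))
  have hchm : ∀ c ∈ pvChilds parents k, c < parents.length :=
    fun c hc => ((mem_childs parents).mp hc).1
  unfold pvScore
  by_cases hk0 : k ≠ 0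
  · simp only [if_pos hk0]
    apply mul_pos (hprod _ hchm 1 one_pos)
    have h1 := cnt_lt_of_ne parents hn hk (by simpa using hk0)
    rw [cnt_zero parents hn hR]
    have h2 : (pvCnt parents k : Int) < (parents.length : Int) := by exact_mod_cast h1
    omega
  · simp only [if_neg hk0]
    exact hprod _ hchm 1 one_pos

-- ---- assembling the two ports ----

lemma childrenB_eq (parents : List Int) (hn : 0 < parents.length) (i : Nat) :
    (pvChildrenB parents).getD i [] = pvChilds parents i := by
  unfold pvChildrenB
  rw [PySem.List.enumerate_eq_map_pyRange parents 0, List.foldl_map]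
  have hlen : PySem.List.len parents = (parents.length : Int) := by
    simp [PySem.List.len_eq]
  rw [hlen, PySem.List.pyRange_one_cons (show (0 : Int) < (parents.length : Int) by
    exact_mod_cast hn), List.foldl_cons]
  rw [show (if (0 : Int) ≠ 0 then
      (List.replicate parents.length ([] : List Nat)).set
        ((PySem.Int.mod (PySem.List.pyGetD parents 0 0) (parents.length : Int)).toNat)
        (((List.replicate parents.length ([] : List Nat)).getD
          ((PySem.Int.mod (PySem.List.pyGetD parents 0 0) (parents.length : Int)).toNat) [] ++
            [(0 : Int).toNat]))
      else List.replicate parents.length ([] : List Nat)) =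
      List.replicate parents.length ([] : List Nat) from by simp]
  rw [PySem.List.foldl_congr_mem _ _
    (fun (son : List (List Nat)) (j : Int) =>
      let p := pvPar parents j.toNat
      son.set p (son.getD p [] ++ [j.toNat]))
    _ ?hcong]
  case hcong =>
    intro acc j hj
    obtain ⟨hj1, hj2⟩ := PySem.List.mem_pyRange_one.mp hj
    have hjne : j ≠ 0 := by omega
    rw [if_pos hjne]
    have hget : PySem.List.pyGetD parents j 0 = parents.getD j.toNat 0 := by
      rw [PySem.List.pyGetD_eq_getElem parents 0 (by omega) (by exact_mod_cast hj2),
        List.getD_eq_getElem parents 0 (by omega)]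
    rw [hget]
    rfl
  exact son_eq parents hn i

lemma sizesB_eq (parents : List Int) (hn : 0 < parents.length)
    (hR : ∀ x, x < parents.length → pvReach parents parents.length x = true) (q : Nat) :
    (pvSizesB parents).getD q 0 = (pvCnt parents q : Int) := by
  unfold pvSizesB
  rw [PySem.List.pyRange_zero_nat parents.length, List.foldl_map]
  simp only [Int.toNat_natCast]
  obtain ⟨-, hget⟩ := sizes_fold parents hn hR (List.range parents.length)
    (List.replicate parents.length 0) (fun j hj => List.mem_range.mp hj) (by simp)
  rw [hget q]
  have hrep : (List.replicate parents.length (0 : Int)).getD q 0 = 0 := by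
    rcases Nat.lt_or_ge q parents.length with h | h
    · rw [List.getD_eq_getElem _ _ (by simpa using h)]
      simp
    · rw [List.getD_eq_default _ _ (by simpa using h)]
  rw [hrep]
  simp [pvCnt]

lemma scoreStepA_eq (parents : List Int) (hn : 0 < parents.length)
    (son : List (List Nat)) (d : PySem.Dict Nat Int)
    (hs : ∀ p, son.getD p [] = pvChilds parents p)
    (hd : ∀ q, q < parents.length → d.getD q 0 = (pvCnt parents q : Int))
    (st : Int × Int) (i : Int) (h0 : 0 ≤ i) (h1 : i < (parents.length : Int)) :
    pvScoreStepA son d st i = pvStep st (pvScore parents i.toNat) := by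
  have hilt : i.toNat < parents.length := by omega
  have hfold : (son.getD i.toNat []).foldl (fun c child => c * d.getD child 0) 1 =
      (pvChilds parents i.toNat).foldl (fun c child => c * (pvCnt parents child : Int)) 1 := by
    rw [hs i.toNat]
    apply PySem.List.foldl_congr_mem
    intro acc c hc
    rw [hd c ((mem_childs parents).mp hc).1]
  have hval : (let cnt := (son.getD i.toNat []).foldl (fun c child => c * d.getD child 0) 1
      if i ≠ 0 then cnt * (d.getD 0 0 - d.getD i.toNat 0) else cnt) =
      pvScore parents i.toNat := by
    unfold pvScore
    dsimp only
    by_cases hi0 : i = 0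
    · subst hi0
      rw [if_neg (by simp), if_neg (by simp), hfold]
    · rw [if_pos hi0, if_pos (show i.toNat ≠ 0 by omega), hfold, hd 0 hn, hd i.toNat hilt]
  exact congrArg (pvStep st) hval

lemma scoreB_eq (parents : List Int) (hn : 0 < parents.length)
    (hR : ∀ x, x < parents.length → pvReach parents parents.length x = true)
    (i : Int) (h0 : 0 ≤ i) (h1 : i < (parents.length : Int)) :
    pvScoreB (pvChildrenB parents) (pvSizesB parents) i = pvScore parents i.toNat := by
  have hilt : i.toNat < parents.length := by omega
  have hfold : ((pvChildrenB parents).getD i.toNat []).foldl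
      (fun s c => s * (pvSizesB parents).getD c 0) 1 =
      (pvChilds parents i.toNat).foldl (fun c child => c * (pvCnt parents child : Int)) 1 := by
    rw [childrenB_eq parents hn i.toNat]
    apply PySem.List.foldl_congr_mem
    intro acc c _
    rw [sizesB_eq parents hn hR c]
  unfold pvScoreB pvScore
  dsimp only
  by_cases hi0 : i = 0
  · subst hi0
    rw [if_neg (by simp), if_neg (by simp), hfold]
  · rw [if_pos hi0, if_pos (show i.toNat ≠ 0 by omega), hfold,
      sizesB_eq parents hn hR 0, sizesB_eq parents hn hR i.toNat]

lemma A_eq (parents : List Int) (hn : 0 < parents.length)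
    (hR : ∀ x, x < parents.length → pvReach parents parents.length x = true) :
    countHighestScoreNodes2 parents =
      (((List.range parents.length).map (fun k => pvScore parents k)).foldl pvStep (0, 0)).1 := by
  unfold countHighestScoreNodes2
  dsimp only
  have hs : ∀ p, (pvSonA parents).getD p [] = pvChilds parents p := son_eq parents hn
  have hd : ∀ q, q < parents.length →
      ((pvCalA (pvSonA parents) (parents.length + 1) 0 PySem.Dict.empty).2).getD q 0 =
        (pvCnt parents q : Int) := by
    intro q hq
    obtain ⟨-, h2⟩ := calA_spec parents (pvSonA parents) hn hR (fun p _ => hs p)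
      (parents.length + 1) 0 PySem.Dict.empty hn (le_trans (cnt_le parents 0) (by omega))
    rw [h2 q, if_pos ⟨hq, zero_mem_chain parents (hR q hq)⟩]
  rw [PySem.List.foldl_congr_mem _ _
    (fun (st : Int × Int) (i : Int) => pvStep st (pvScore parents i.toNat)) _ ?hcong]
  case hcong =>
    intro st i hi
    obtain ⟨h0, h1⟩ := PySem.List.mem_pyRange_one.mp hi
    exact scoreStepA_eq parents hn _ _ hs hd st i h0 h1
  rw [PySem.List.pyRange_zero_nat parents.length, List.foldl_map]
  simp only [Int.toNat_natCast]
  rw [← List.foldl_map (f := fun k => pvScore parents k) (g := pvStep)]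

lemma maxB (l : List Int) (hne : l ≠ []) (hpos : ∀ x ∈ l, 0 < x) :
    (match PySem.List.max? l (fun x => x) with
      | some m => (PySem.List.count l m : Int)
      | none => 0) = (List.count (l.foldl max 0) l : Int) := by
  obtain ⟨h, t, rfl⟩ := List.exists_cons_of_ne_nil hne
  rw [PySem.List.max?_id_cons]
  have hM : List.foldl max 0 (h :: t) = List.foldl max h t := by
    rw [List.foldl_cons, max_eq_right (le_of_lt (hpos h (by simp)))]
  dsimp only
  rw [hM, PySem.List.count_eq]

lemma B_eq (parents : List Int) (hn : 0 < parents.length)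
    (hR : ∀ x, x < parents.length → pvReach parents parents.length x = true) :
    countHighestScoreNodes2_alt parents =
      (List.count (((List.range parents.length).map (fun k => pvScore parents k)).foldl max 0)
        ((List.range parents.length).map (fun k => pvScore parents k)) : Int) := by
  unfold countHighestScoreNodes2_alt
  dsimp only
  rw [PySem.List.foldl_congr_mem _ _
    (fun (sc : List Int) (i : Int) => sc ++ [pvScore parents i.toNat]) _ ?hcong]
  case hcong =>
    intro sc i hi
    obtain ⟨h0, h1⟩ := PySem.List.mem_pyRange_one.mp hi
    rw [scoreB_eq parents hn hR i h0 h1]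
  rw [PySem.List.foldl_append_singleton_eq_map, List.nil_append,
    PySem.List.pyRange_zero_nat parents.length, List.map_map]
  simp only [Function.comp_def, Int.toNat_natCast]
  apply maxB
  · simp only [ne_eq, List.map_eq_nil_iff, List.range_eq_nil]
    omega
  · intro x hx
    obtain ⟨k, hk, rfl⟩ := List.mem_map.mp hx
    exact score_pos parents hn hR (List.mem_range.mp hk)

-- ===== VERDICT (by name: the statement is the Claim_ definition above) =====
theorem countHighestScoreNodes2_spec : Claim_equal_countHighestScoreNodes2 := by
  intro parents _ hpre
  obtain ⟨hn1, hall⟩ := hpre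
  have hn : 0 < parents.length := hn1
  have hR : ∀ x, x < parents.length → pvReach parents parents.length x = true := by
    intro x hx
    rcases hall x (by simpa using hx) with h0 | h
    · subst h0
      exact reach_zero parents _
    · obtain ⟨k, hk, hit⟩ := h.2.2
      exact reach_mono parents (by simpa using Nat.lt_succ_iff.mp (List.mem_range.mp hk))
        (iterate_reach parents k x hit)
  unfold Spec_countHighestScoreNodes2
  have hpos : ∀ x ∈ (List.range parents.length).map (fun k => pvScore parents k), 0 < x := by
    intro x hx
    obtain ⟨k, hk, rfl⟩ := List.mem_map.mp hx
    exact score_pos parents hn hR (List.mem_range.mp hk)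
  have hne : (List.range parents.length).map (fun k => pvScore parents k) ≠ [] := by
    simp only [ne_eq, List.map_eq_nil_iff, List.range_eq_nil]
    omega
  rw [A_eq parents hn hR, B_eq parents hn hR, step_fold _ hpos, if_neg hne]
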